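-- pv_equiv track=rewrite | github.com/delguoqing/DMC4SETools | src/mod_parser.py | dump_obj_faces
-- ===== SOURCE A (Python) =====
-- DUMP_NORMAL = True
--
-- DUMP_UV = True
--
-- def dump_obj_faces(indices, base=0):
-- 	obj_lines = []
-- 	assert len(indices) % 3 == 0, "DMC4SE uses TRIANGLE_LIST as its only primtive type"
--
-- 	fmt = "%d"
-- 	elem_count = 1
-- 	if DUMP_UV:
-- 		fmt += "/%d"
-- 		elem_count += 1
-- 	if DUMP_NORMAL:
-- 		if not DUMP_UV:
-- 			fmt += "/"
-- 		fmt += "/%d"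
-- 		elem_count += 1
-- 	face_fmt = "f %s %s %s" % (fmt, fmt, fmt)
--
-- 	for i in range(0, len(indices), 3):
-- 		args = []
-- 		for j in range(3):
-- 			index = indices[i + j] - base + 1
-- 			args.extend([index] * elem_count)
-- 		obj_lines.append(face_fmt % tuple(args))
--
-- 	return obj_lines
-- ===== SOURCE B (Python) =====
-- DUMP_NORMAL = True
--
-- DUMP_UV = True
--
--
-- def dump_obj_faces(indices, base=0):
--     assert len(indices) % 3 == 0, "DMC4SE uses TRIANGLE_LIST as its only primtive type"
--     fmt = "%d"
--     elem_count = 1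
--     if DUMP_UV:
--         fmt += "/%d"
--         elem_count += 1
--     if DUMP_NORMAL:
--         if not DUMP_UV:
--             fmt += "/"
--         fmt += "/%d"
--         elem_count += 1
--     tokens = [fmt % ((ix - base + 1,) * elem_count) for ix in indices]
--     return ["f %s %s %s" % (tokens[k], tokens[k + 1], tokens[k + 2])
--             for k in range(0, len(tokens), 3)]
-- ===== Notes on version B (the rewrite author's own statement) =====
-- stated objective: alternative
-- what changed: Replaces A's nested strided loop (which rebuilds a 9-element args list per face and formats all nine at once) by a flat map producing one token string per vertex followed by a chunk-by-3 pass that joins tokens into face lines.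
import Mathlib
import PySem

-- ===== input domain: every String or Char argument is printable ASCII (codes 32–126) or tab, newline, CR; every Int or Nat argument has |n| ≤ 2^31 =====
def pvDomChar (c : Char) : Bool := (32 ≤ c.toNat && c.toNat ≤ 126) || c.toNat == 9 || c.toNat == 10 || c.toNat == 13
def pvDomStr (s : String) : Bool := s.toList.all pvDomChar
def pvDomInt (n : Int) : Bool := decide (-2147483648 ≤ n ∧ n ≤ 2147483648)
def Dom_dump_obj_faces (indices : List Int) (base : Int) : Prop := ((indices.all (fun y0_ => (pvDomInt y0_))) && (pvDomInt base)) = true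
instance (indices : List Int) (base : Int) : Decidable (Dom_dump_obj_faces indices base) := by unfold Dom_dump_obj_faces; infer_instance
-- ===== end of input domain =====

-- B formats one token string per vertex in a flat map and then joins tokens three at a
-- time, instead of A's nested strided loop that rebuilds a 9-element args list per face;
-- same cost, different decomposition ("alternative").

-- Python '%'-interpolation over a format string all of whose directives are '%d',
-- ported by hand over the char list; exact for such format strings with enough args.
def pvFmtD : List Char → List Int → List Char
  | '%' :: 'd' :: rest, a :: as => PySem.Int.toChars a ++ pvFmtD rest as
  | c :: rest, as => c :: pvFmtD rest as
  | [], _ => []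

-- ===== PORT A =====
-- The module globals DUMP_UV = DUMP_NORMAL = True are literal constants, so A's if-chain
-- is constant-folded at port time: fmt = "%d/%d/%d", elem_count = 3,
-- face_fmt = "f %s %s %s" % (fmt, fmt, fmt) = "f %d/%d/%d %d/%d/%d %d/%d/%d".
def dump_obj_faces (indices : List Int) (base : Int) : List String :=
  let elem_count : Int := 3
  let face_fmt := "f %d/%d/%d %d/%d/%d %d/%d/%d"
  (PySem.List.pyRange 0 (indices.length : Int) 3).foldl (fun obj_lines i =>
    let args := (PySem.List.pyRange 0 3 1).foldl (fun args j =>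
      let index := PySem.List.pyGetD indices (i + j) 0 - base + 1
      args ++ List.replicate elem_count.toNat index) []
    obj_lines ++ [String.ofList (pvFmtD face_fmt.toList args)]) []

-- ===== PORT B =====
-- B reads the same literal globals, so its fmt/elem_count are the same constants:
-- fmt = "%d/%d/%d", elem_count = 3.
def dump_obj_faces_alt (indices : List Int) (base : Int) : List String :=
  let elem_count : Int := 3
  let fmt := "%d/%d/%d"
  let tokens := indices.map (fun ix =>
    String.ofList (pvFmtD fmt.toList (List.replicate elem_count.toNat (ix - base + 1))))
  (PySem.List.pyRange 0 (tokens.length : Int) 3).map (fun k =>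
    "f " ++ PySem.List.pyGetD tokens k "" ++ " " ++ PySem.List.pyGetD tokens (k + 1) ""
      ++ " " ++ PySem.List.pyGetD tokens (k + 2) "")

-- ===== PRECONDITION & SPEC =====
-- A asserts len(indices) % 3 == 0 (AssertionError otherwise); exactly those inputs are excluded.
def Pre_dump_obj_faces (indices : List Int) (base : Int) : Prop := indices.length % 3 = 0
instance (indices : List Int) (base : Int) : Decidable (Pre_dump_obj_faces indices base) := by
  unfold Pre_dump_obj_faces; infer_instance
def pvWitness_dump_obj_faces : List Int × Int := ([4, 5, 6], 1)

def Spec_dump_obj_faces (indices : List Int) (base : Int) (out : List String) : Prop := out = dump_obj_faces_alt indices base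
instance (indices : List Int) (base : Int) (out : List String) : Decidable (Spec_dump_obj_faces indices base out) := by unfold Spec_dump_obj_faces; infer_instance

-- ===== CLAIM (what is proved, stated in full; the proofs are below) =====
def Claim_equal_dump_obj_faces : Prop := ∀ (indices : List Int) (base : Int), Dom_dump_obj_faces indices base → Pre_dump_obj_faces indices base → Spec_dump_obj_faces indices base (dump_obj_faces indices base)

-- ===== LEMMAS AND PROOFS =====

theorem dump_obj_faces_eq_alt (indices : List Int) (base : Int)
    (hpre : indices.length % 3 = 0) :
    dump_obj_faces indices base = dump_obj_faces_alt indices base := by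
  unfold dump_obj_faces dump_obj_faces_alt
  simp only [List.length_map, show ((3:Int)).toNat = 3 from rfl]
  rw [PySem.List.foldl_append_singleton_eq_map]
  simp only [List.nil_append]
  apply List.map_congr_left
  intro i hi
  rw [PySem.List.mem_pyRange_iff_of_pos (by norm_num)] at hi
  obtain ⟨h0, h1, h3⟩ := hi
  have hlen : (3 : Int) ∣ (indices.length : Int) := by omega
  have hi2 : i + 2 < (indices.length : Int) := by omega
  have hb : ∀ j : Int, 0 ≤ j → j ≤ 2 →
      PySem.List.pyGetD (indices.map (fun ix =>
        String.ofList (pvFmtD "%d/%d/%d".toList (List.replicate 3 (ix - base + 1))))) (i + j) "" =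
      String.ofList (pvFmtD "%d/%d/%d".toList
        (List.replicate 3 (PySem.List.pyGetD indices (i + j) 0 - base + 1))) := by
    intro j hj0 hj2
    rw [PySem.List.pyGetD_eq_getElem _ _ (by omega) (by simp; omega),
        PySem.List.pyGetD_eq_getElem _ _ (by omega) (by omega)]
    simp
  have g0 := hb 0 (by norm_num) (by norm_num)
  have g1 := hb 1 (by norm_num) (by norm_num)
  have g2 := hb 2 (by norm_num) (by norm_num)
  rw [show i + (0:Int) = i from by ring] at g0
  rw [g0, g1, g2]
  rw [show PySem.List.pyRange 0 3 1 = [0, 1, 2] from by decide]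
  simp only [List.foldl_cons, List.foldl_nil, List.nil_append]
  apply String.toList_injective
  simp [pvFmtD, List.replicate, show ("f " : String).toList = ['f', ' '] from rfl,
    show (" " : String).toList = [' '] from rfl]

-- ===== VERDICT (by name: the statement is the Claim_ definition above) =====
theorem dump_obj_faces_spec : Claim_equal_dump_obj_faces := by
  intro indices base _ hpre
  unfold Spec_dump_obj_faces
  exact dump_obj_faces_eq_alt indices base hpre
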